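-- pv_equiv track=rewrite | github.com/Adileakklc/hamming-simulator | hamming_code.py | databitlerini_cikar
-- ===== SOURCE A (Python) =====
-- def parity_bitlerini_hesapla(data_bits):
--     """
--     Verilen veri bitleri için gerekli parite bitlerinin sayısını hesaplar.
--     """
--     n = len(data_bits)
--     r = 0
--     while (2**r) < (n + r + 1):
--         r += 1
--     return r
--
-- def databitlerini_cikar(hamming_code):
--     """
--     Hamming kodundan orijinal veri bitlerini çıkarır.
--     """
--     n = len(hamming_code)
--     r = parity_bitlerini_hesapla([0] * (n - len(bin(n)[2:]) + 1))
--     data_bits = []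
--
--     j = 0
--     for i in range(1, n + 1):
--         if i != 2**j:
--             data_bits.append(hamming_code[i - 1])
--         else:
--             j += 1
--
--     return data_bits
-- ===== SOURCE B (Python) =====
-- def databitlerini_cikar(hamming_code):
--     """
--     Hamming kodundan orijinal veri bitlerini cikarir.
--     Doubling loop over power-of-two blocks: for p = 1, 2, 4, ... <= n the
--     slice hamming_code[p : min(2*p - 1, n)] is exactly the run of data bits
--     strictly between parity positions p and 2p (1-based).
--     """
--     n = len(hamming_code)
--     data_bits = []
--     p = 1
--     while p <= n:
--         data_bits.extend(hamming_code[p : min(2 * p - 1, n)])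
--         p *= 2
--     return data_bits
-- ===== Notes on version B (the rewrite author's own statement) =====
-- stated objective: alternative
-- what changed: Replaces the per-element scan that tests every 1-based position against the next power of two by a doubling loop that appends whole slices hamming_code[p : min(2*p-1, n)] for p = 1, 2, 4, ..., so power-of-two positions are excluded as block boundaries instead of by a branch (the dead parity-bit computation of A is dropped).
import Mathlib
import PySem

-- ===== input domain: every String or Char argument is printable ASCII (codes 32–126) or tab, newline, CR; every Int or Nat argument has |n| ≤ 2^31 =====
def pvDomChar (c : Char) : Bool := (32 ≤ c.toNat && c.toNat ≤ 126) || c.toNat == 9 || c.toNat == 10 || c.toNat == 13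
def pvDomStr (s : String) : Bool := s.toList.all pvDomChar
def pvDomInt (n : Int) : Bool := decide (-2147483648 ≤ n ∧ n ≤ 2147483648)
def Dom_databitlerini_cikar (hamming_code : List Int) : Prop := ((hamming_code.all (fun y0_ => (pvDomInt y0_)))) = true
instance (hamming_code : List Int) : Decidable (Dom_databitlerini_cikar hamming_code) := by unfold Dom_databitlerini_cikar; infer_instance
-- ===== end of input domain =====

-- B changes the decomposition: instead of scanning every position and testing it against the
-- next power of two, it appends the whole run of data bits between consecutive parity
-- positions p and 2p for p = 1, 2, 4, …; same O(n) cost, different loop structure.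

-- ===== PORT A =====

-- termination fact for the while-loop of parity_bitlerini_hesapla
theorem pv_two_mul_le_two_pow (r : Nat) : 2 * r ≤ 2 ^ r := by
  induction r with
  | zero => simp
  | succ k ih =>
    rcases Nat.eq_zero_or_pos k with hk | hk
    · subst hk; simp
    · have h1 : 2 ≤ 2 ^ k := by
        calc 2 = 2 * 1 := by omega
        _ ≤ 2 * k := by omega
        _ ≤ 2 ^ k := ih
      have : 2 ^ (k + 1) = 2 * 2 ^ k := by ring
      omega

-- while (2**r) < (n + r + 1): r += 1; return r
def parityLoop (n r : Nat) : Nat :=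
  if 2 ^ r < n + r + 1 then parityLoop n (r + 1) else r
termination_by n + 1 - r
decreasing_by
  have h2 := pv_two_mul_le_two_pow r
  omega

-- len(bin(n)[2:])  (bin(0) = '0b0' has one digit)
def pyBitLen (n : Nat) : Nat := if n = 0 then 1 else Nat.log2 n + 1

-- literal port of A; 'n - len(bin(n)[2:]) + 1' is never negative in Python and equals
-- 'n + 1 - pyBitLen n' over Nat; the computed r is dead, exactly as in the Python
def databitlerini_cikar (hamming_code : List Int) : List Int :=
  let n := hamming_code.length
  let _r := parityLoop (n + 1 - pyBitLen n) 0
  (((List.range' 1 n).foldl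
      (fun st i =>
        if i ≠ 2 ^ st.1 then (st.1, st.2 ++ [hamming_code.getD (i - 1) 0])
        else (st.1 + 1, st.2))
      ((0 : Nat), ([] : List Int))).2)

-- ===== PORT B =====

-- while p <= n: data_bits.extend(hamming_code[p : min(2*p - 1, n)]); p *= 2
-- ('0 < p' only makes the doubling recursion total; the loop is entered with p = 1)
def sliceLoop (hamming_code : List Int) (n p : Nat) (acc : List Int) : List Int :=
  if 0 < p ∧ p ≤ n then
    sliceLoop hamming_code n (2 * p)
      (acc ++ PySem.List.slice hamming_code (some (p : Int)) (some ((min (2 * p - 1) n : Nat) : Int)))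
  else acc
termination_by n + 1 - p

def databitlerini_cikar_alt (hamming_code : List Int) : List Int :=
  sliceLoop hamming_code hamming_code.length 1 []

-- ===== PRECONDITION & SPEC =====
def Spec_databitlerini_cikar (hamming_code : List Int) (out : List Int) : Prop := out = databitlerini_cikar_alt hamming_code
instance (hamming_code : List Int) (out : List Int) : Decidable (Spec_databitlerini_cikar hamming_code out) := by unfold Spec_databitlerini_cikar; infer_instance

-- ===== CLAIM (what is proved, stated in full; the proofs are below) =====
def Claim_equal_databitlerini_cikar : Prop := ∀ (hamming_code : List Int), Dom_databitlerini_cikar hamming_code → Spec_databitlerini_cikar hamming_code (databitlerini_cikar hamming_code)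

-- ===== LEMMAS AND PROOFS =====

def isPow2 (m : Nat) : Bool := 2 ^ Nat.log2 m == m

-- the data bits at 1-based positions s, s+1, …, s+m-1, skipping powers of two
def seg (hc : List Int) (s m : Nat) : List Int :=
  ((List.range' s m).filter (fun x => !isPow2 x)).map (fun x => hc.getD (x - 1) 0)

theorem isPow2_true (t : Nat) : isPow2 (2 ^ t) = true := by
  unfold isPow2
  rw [Nat.log2_two_pow]
  exact beq_self_eq_true _

theorem isPow2_false {x t : Nat} (h1 : 2 ^ t < x) (h2 : x < 2 ^ (t + 1)) : isPow2 x = false := by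
  simp only [isPow2, beq_iff_eq, Bool.eq_false_iff, ne_eq]
  intro h
  set k := Nat.log2 x with hk
  rw [← h] at h1 h2
  have hkt : t < k := (Nat.pow_lt_pow_iff_right (by omega : 1 < 2)).mp h1
  have hkt2 : k < t + 1 := (Nat.pow_lt_pow_iff_right (by omega : 1 < 2)).mp h2
  omega

theorem seg_zero (hc : List Int) (s : Nat) : seg hc s 0 = [] := rfl

theorem seg_split (hc : List Int) (s m₁ m₂ : Nat) :
    seg hc s (m₁ + m₂) = seg hc s m₁ ++ seg hc (s + m₁) m₂ := by
  unfold seg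
  rw [← List.range'_append_1, List.filter_append, List.map_append]

theorem seg_one_pow (hc : List Int) (t s : Nat) (hs : s = 2 ^ t) : seg hc s 1 = [] := by
  subst hs
  simp [seg, List.range'_one, isPow2_true t]

theorem seg_one_nonpow (hc : List Int) (s : Nat) (hs : isPow2 s = false) :
    seg hc s 1 = [hc.getD (s - 1) 0] := by
  simp [seg, List.range'_one, hs]

-- ---------- A's fold computes seg ----------

theorem foldA (hc : List Int) (m : Nat) : ∀ (i j : Nat) (acc : List Int),
    i ≤ 2 ^ j → 2 ^ j < 2 * i →
    (((List.range' i m).foldl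
        (fun st x =>
          if x ≠ 2 ^ st.1 then (st.1, st.2 ++ [hc.getD (x - 1) 0])
          else (st.1 + 1, st.2))
        (j, acc)).2) = acc ++ seg hc i m := by
  induction m with
  | zero => intro i j acc _ _; simp [seg]
  | succ m ih =>
    intro i j acc h1 h2
    rw [List.range'_succ]
    simp only [List.foldl_cons]
    by_cases hij : i = 2 ^ j
    · rw [if_neg (by omega)]
      have hpow : 2 ^ (j + 1) = 2 * 2 ^ j := by ring
      rw [ih (i + 1) (j + 1) acc (by omega) (by omega)]
      rw [show m + 1 = 1 + m by omega, seg_split, seg_one_pow hc j i hij]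
      simp
    · rw [if_pos hij]
      have hlt : i < 2 ^ j := by omega
      have hnp : isPow2 i = false := by
        rcases j with _ | j'
        · exfalso; simp at h1 hlt; omega
        · have hpow : 2 ^ (j' + 1) = 2 * 2 ^ j' := by ring
          exact isPow2_false (t := j') (by omega) (by omega)
      rw [ih (i + 1) j _ (by omega) (by omega)]
      rw [show m + 1 = 1 + m by omega, seg_split, seg_one_nonpow hc i hnp]
      simp

theorem A_eq_seg (hc : List Int) :
    databitlerini_cikar hc = seg hc 1 hc.length := by
  unfold databitlerini_cikar
  exact foldA hc hc.length 1 0 [] (by norm_num) (by norm_num)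

-- ---------- B's slice loop computes seg ----------

theorem drop_take_eq_map (hc : List Int) (p m : Nat) (h : p + m ≤ hc.length) :
    (hc.drop p).take m = (List.range' (p + 1) m).map (fun x => hc.getD (x - 1) 0) := by
  apply List.ext_getElem
  · simp [List.length_take, List.length_drop]; omega
  · intro i h1 h2
    have hi : i < m := by simpa using h2
    have hip : p + i < hc.length := by omega
    simp [List.getElem_take, List.getElem_drop, List.getElem_range',
      List.getD_eq_getElem?_getD, List.getElem?_eq_getElem hip]

theorem seg_no_pow (hc : List Int) (t m : Nat) (hm : 2 ^ t + m < 2 ^ (t + 1)) :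
    seg hc (2 ^ t + 1) m = (List.range' (2 ^ t + 1) m).map (fun x => hc.getD (x - 1) 0) := by
  unfold seg
  congr 1
  apply List.filter_eq_self.mpr
  intro x hx
  have hx' := List.mem_range'_1.mp hx
  rw [isPow2_false (t := t) (by omega) (by omega)]
  rfl

theorem sliceLoop_eq (hc : List Int) (d : Nat) : ∀ (t : Nat) (acc : List Int),
    hc.length + 1 - 2 ^ t ≤ d →
    sliceLoop hc hc.length (2 ^ t) acc = acc ++ seg hc (2 ^ t + 1) (hc.length - 2 ^ t) := by
  induction d with
  | zero =>
    intro t acc hd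
    have hp : 0 < 2 ^ t := Nat.pow_pos (by omega)
    rw [sliceLoop, if_neg (by omega)]
    rw [show hc.length - 2 ^ t = 0 by omega, seg_zero, List.append_nil]
  | succ d ih =>
    intro t acc hd
    have hp : 0 < 2 ^ t := Nat.pow_pos (by omega)
    have hpow : 2 ^ (t + 1) = 2 * 2 ^ t := by ring
    rw [sliceLoop]
    by_cases hle : 2 ^ t ≤ hc.length
    · rw [if_pos ⟨hp, hle⟩]
      have hrec := ih (t + 1)
        (acc ++ PySem.List.slice hc (some ((2 ^ t : Nat) : Int))
          (some ((min (2 * 2 ^ t - 1) hc.length : Nat) : Int)))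
        (by omega)
      rw [hpow] at hrec
      rw [hrec,
        PySem.List.slice_natCast hc (2 ^ t) (min (2 * 2 ^ t - 1) hc.length),
        List.append_assoc]
      congr 1
      by_cases hcase : 2 * 2 ^ t - 1 < hc.length
      · -- the slice ends at 2p-1; position 2p is dropped; the rest recurses
        rw [Nat.min_eq_left (by omega)]
        rw [show hc.length - 2 ^ t = (2 ^ t - 1) + (1 + (hc.length - 2 * 2 ^ t)) by omega,
          seg_split, seg_split]
        rw [seg_one_pow hc (t + 1) (2 ^ t + 1 + (2 ^ t - 1)) (by omega)]
        rw [show 2 ^ t + 1 + (2 ^ t - 1) + 1 = 2 * 2 ^ t + 1 by omega]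
        rw [seg_no_pow hc t (2 ^ t - 1) (by omega)]
        rw [drop_take_eq_map hc (2 ^ t) (2 * 2 ^ t - 1 - 2 ^ t) (by omega)]
        rw [show 2 * 2 ^ t - 1 - 2 ^ t = 2 ^ t - 1 by omega]
        simp
      · -- the whole tail is data bits; the recursive call is empty
        rw [Nat.min_eq_right (by omega)]
        rw [show hc.length - 2 * 2 ^ t = 0 by omega, seg_zero, List.append_nil]
        rw [drop_take_eq_map hc (2 ^ t) (hc.length - 2 ^ t) (by omega)]
        rw [seg_no_pow hc t (hc.length - 2 ^ t) (by omega)]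
    · rw [if_neg (by omega)]
      rw [show hc.length - 2 ^ t = 0 by omega, seg_zero, List.append_nil]

theorem B_eq_seg (hc : List Int) :
    databitlerini_cikar_alt hc = seg hc 2 (hc.length - 1) := by
  unfold databitlerini_cikar_alt
  have h := sliceLoop_eq hc (hc.length + 1 - 1) 0 [] (by norm_num)
  simpa using h

theorem seg_head (hc : List Int) :
    seg hc 1 hc.length = seg hc 2 (hc.length - 1) := by
  cases hn : hc.length with
  | zero => rfl
  | succ m =>
    rw [show m + 1 = 1 + m by omega, seg_split, seg_one_pow hc 0 1 rfl]
    simp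

-- ===== VERDICT (by name: the statement is the Claim_ definition above) =====
theorem databitlerini_cikar_spec : Claim_equal_databitlerini_cikar := by
  intro hc _
  unfold Spec_databitlerini_cikar
  rw [A_eq_seg, B_eq_seg, seg_head]
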